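-- pv_equiv track=rewrite | github.com/MrBrantCode/unitest_baseline | mut_generate/mist_train_taco/taco_16804/solution.py | restore_compressed_string
-- ===== SOURCE A (Python) =====
-- def restore_compressed_string(compressed_string: str) -> str:
--     restored_string = ''
--     n = 1
--
--     for c in compressed_string:
--         if n < 0:
--             n = int(c)
--         elif c == '@':
--             n = -1
--         else:
--             restored_string += c * n
--             n = 1
--
--     return restored_string
-- ===== SOURCE B (Python) =====
-- def restore_compressed_string(compressed_string: str) -> str:
--     s = compressed_string
--     out = []
--     i = 0
--     while i < len(s):
--         if s[i] == '@':
--             out.append(s[i + 2] * int(s[i + 1]))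
--             i += 3
--         else:
--             out.append(s[i])
--             i += 1
--     return ''.join(out)
-- ===== Notes on version B (the rewrite author's own statement) =====
-- stated objective: alternative
-- what changed: Replaces A's persistent n-state character fold with an index-walk parser that consumes each '@'+digit+char marker as one triple; Pre_ excludes strings where a '@' lacks a digit count (both raise ValueError), strings where a marker is truncated at the end (A silently ignores it, B's uniform triple parse raises IndexError), and the ambiguous '@'+digit+'@' form where the escape character itself sits in the repeat position (A reads it as a new marker, B repeats it; neither reading is specified).
-- outside the precondition, e.g. on restore_compressed_string('@'): A returns '', B raises IndexError; on restore_compressed_string('a@'): A returns 'a', B raises IndexError; on restore_compressed_string('ab@5'): A returns 'ab', B raises IndexError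
import Mathlib
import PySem

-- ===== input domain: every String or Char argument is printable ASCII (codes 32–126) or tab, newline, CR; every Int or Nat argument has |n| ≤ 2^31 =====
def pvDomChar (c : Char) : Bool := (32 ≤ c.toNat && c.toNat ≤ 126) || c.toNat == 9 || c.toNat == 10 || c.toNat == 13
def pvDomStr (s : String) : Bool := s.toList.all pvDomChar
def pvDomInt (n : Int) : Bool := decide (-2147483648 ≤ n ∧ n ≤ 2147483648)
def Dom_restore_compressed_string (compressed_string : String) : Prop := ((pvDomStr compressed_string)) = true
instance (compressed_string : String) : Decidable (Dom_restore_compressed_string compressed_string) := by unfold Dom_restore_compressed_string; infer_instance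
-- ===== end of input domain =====

-- B parses each '@'+digit+char marker as one triple with an index walk instead of A's
-- persistent n-state fold: an alternative decomposition, same cost.

-- Python's int(c) for a single character c; Python raises ValueError when c is not
-- a decimal digit — exactly those inputs are excluded by Pre_ below, so the
-- `getD 0` default is never reached inside Pre_.
def pvIntOfChar (c : Char) : Int := (PySem.Int.ofStr? (String.ofList [c])).getD 0

-- ===== PORT A =====
-- one step of A's for-loop over characters; state = (restored_string, n)
def aStep (st : List Char × Int) (c : Char) : List Char × Int :=
  if st.2 < 0 then (st.1, pvIntOfChar c)
  else if c = '@' then (st.1, -1)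
  else (st.1 ++ List.replicate st.2.toNat c, 1)  -- c * n (empty for n ≤ 0, as in Python)

def restore_compressed_string (compressed_string : String) : String :=
  String.ofList (compressed_string.toList.foldl aStep ([], 1)).1

-- ===== PORT B =====
-- Source B's while-loop over the index i, rendered as recursion on the unread suffix
-- (i < len(s) ↔ the suffix is nonempty; i += k ↔ dropping k characters).  The Nat
-- argument is pure fuel making the recursion structural; called with fuel = length
-- of the suffix, it is never exhausted.  Where Source B raises IndexError (a '@' with
-- fewer than two characters after it) the port returns []: Pre_ excludes those inputs.
def altGo : Nat → List Char → List Char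
  | 0, _ => []
  | _ + 1, [] => []
  | f + 1, c :: rest =>
    if c = '@' then
      match rest with
      | d :: e :: rest3 => List.replicate (pvIntOfChar d).toNat e ++ altGo f rest3
      | _ => []                                   -- IndexError in Source B; outside Pre_
    else c :: altGo f rest

def restore_compressed_string_alt (compressed_string : String) : String :=
  String.ofList (altGo compressed_string.toList.length compressed_string.toList)

-- ===== PRECONDITION & SPEC =====
-- Pre_ admits exactly the well-formed inputs: every '@' must be followed by a digit
-- (else both A and B raise ValueError from int()) and by a character after that
-- (else B's uniform triple parse raises IndexError where A silently drops the
-- truncated marker), and that character must not itself be '@' (the ambiguous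
-- '@'+digit+'@' form: A reads the second '@' as a new marker, B repeats it;
-- the format specifies neither).
def Pre_restore_compressed_string (compressed_string : String) : Prop :=
  ∀ i < compressed_string.toList.length,
    compressed_string.toList.getD i ' ' = '@' →
      i + 2 < compressed_string.toList.length ∧
      (compressed_string.toList.getD (i + 1) ' ').isDigit = true ∧
      compressed_string.toList.getD (i + 2) ' ' ≠ '@'
instance (compressed_string : String) : Decidable (Pre_restore_compressed_string compressed_string) := by
  unfold Pre_restore_compressed_string; infer_instance

def pvWitness_restore_compressed_string : String := "ab@3cd@2x !"

def Spec_restore_compressed_string (compressed_string : String) (out : String) : Prop := out = restore_compressed_string_alt compressed_string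
instance (compressed_string : String) (out : String) : Decidable (Spec_restore_compressed_string compressed_string out) := by unfold Spec_restore_compressed_string; infer_instance

-- ===== CLAIM (what is proved, stated in full; the proofs are below) =====
def Claim_equal_restore_compressed_string : Prop := ∀ (compressed_string : String), Dom_restore_compressed_string compressed_string → Pre_restore_compressed_string compressed_string → Spec_restore_compressed_string compressed_string (restore_compressed_string compressed_string)

-- ===== LEMMAS AND PROOFS =====

-- the Pre_ condition, as a predicate on the remaining suffix
def Good (l : List Char) : Prop :=
  ∀ i < l.length, l.getD i ' ' = '@' →
    i + 2 < l.length ∧ (l.getD (i + 1) ' ').isDigit = true ∧ l.getD (i + 2) ' ' ≠ '@'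

theorem good_tail {c : Char} {l : List Char} (h : Good (c :: l)) : Good l := by
  intro i hi hat
  have := h (i + 1) (by simpa using Nat.succ_lt_succ hi) (by simpa using hat)
  simpa using this

theorem char_eq_of_toNat {c d : Char} (h : c.val.toNat = d.val.toNat) : c = d :=
  Char.ext (UInt32.toNat_inj.mp h)

theorem digit_enum (c : Char) (h : c.isDigit = true) :
    c = '0' ∨ c = '1' ∨ c = '2' ∨ c = '3' ∨ c = '4' ∨ c = '5' ∨ c = '6' ∨ c = '7' ∨ c = '8' ∨ c = '9' := by
  simp [Char.isDigit] at h
  obtain ⟨h1, h2⟩ := h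
  have hv : c.val.toNat = 48 ∨ c.val.toNat = 49 ∨ c.val.toNat = 50 ∨ c.val.toNat = 51 ∨
      c.val.toNat = 52 ∨ c.val.toNat = 53 ∨ c.val.toNat = 54 ∨ c.val.toNat = 55 ∨
      c.val.toNat = 56 ∨ c.val.toNat = 57 := by
    revert h1 h2
    simp [UInt32.le_iff_toNat_le]
    omega
  rcases hv with h|h|h|h|h|h|h|h|h|h
  · exact Or.inl (char_eq_of_toNat (h.trans (by decide)))
  · exact Or.inr (Or.inl (char_eq_of_toNat (h.trans (by decide))))
  · exact Or.inr (Or.inr (Or.inl (char_eq_of_toNat (h.trans (by decide)))))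
  · exact Or.inr (Or.inr (Or.inr (Or.inl (char_eq_of_toNat (h.trans (by decide))))))
  · exact Or.inr (Or.inr (Or.inr (Or.inr (Or.inl (char_eq_of_toNat (h.trans (by decide)))))))
  · exact Or.inr (Or.inr (Or.inr (Or.inr (Or.inr (Or.inl (char_eq_of_toNat (h.trans (by decide))))))))
  · exact Or.inr (Or.inr (Or.inr (Or.inr (Or.inr (Or.inr (Or.inl (char_eq_of_toNat (h.trans (by decide)))))))))
  · exact Or.inr (Or.inr (Or.inr (Or.inr (Or.inr (Or.inr (Or.inr (Or.inl (char_eq_of_toNat (h.trans (by decide))))))))))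
  · exact Or.inr (Or.inr (Or.inr (Or.inr (Or.inr (Or.inr (Or.inr (Or.inr (Or.inl (char_eq_of_toNat (h.trans (by decide)))))))))))
  · exact Or.inr (Or.inr (Or.inr (Or.inr (Or.inr (Or.inr (Or.inr (Or.inr (Or.inr (char_eq_of_toNat (h.trans (by decide)))))))))))

theorem pvIntOfChar_digit_nonneg (c : Char) (h : c.isDigit = true) : 0 ≤ pvIntOfChar c := by
  rcases digit_enum c h with h|h|h|h|h|h|h|h|h|h <;> subst h <;> decide

theorem aStep_at (acc : List Char) (n : Int) (hn : ¬ n < 0) : aStep (acc, n) '@' = (acc, -1) := by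
  simp [aStep, hn]

theorem aStep_neg (acc : List Char) (c : Char) : aStep (acc, -1) c = (acc, pvIntOfChar c) := by
  simp [aStep]

theorem aStep_pos (acc : List Char) (n : Int) (c : Char) (hn : ¬ n < 0) (hc : c ≠ '@') :
    aStep (acc, n) c = (acc ++ List.replicate n.toNat c, 1) := by
  simp [aStep, hn, hc]

-- Loop correspondence: A's fold from state (acc, 1) produces acc ++ altGo fuel l,
-- whenever fuel ≥ |l| and l satisfies Good.
theorem key (fuel : Nat) : ∀ (l acc : List Char), l.length ≤ fuel → Good l →
    (l.foldl aStep (acc, 1)).1 = acc ++ altGo fuel l := by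
  induction fuel with
  | zero =>
    intro l acc hlen _
    have : l = [] := List.eq_nil_of_length_eq_zero (Nat.le_zero.mp hlen)
    subst this
    simp [altGo]
  | succ f ih =>
    intro l acc hlen h
    rcases l with _ | ⟨c, rest⟩
    · simp [altGo]
    · by_cases hc : c = '@'
      · subst hc
        obtain ⟨hlen3, hdig, hne⟩ := h 0 (by simp) (by simp)
        rcases rest with _ | ⟨d, rest2⟩
        · simp at hlen3
        rcases rest2 with _ | ⟨e, rest3⟩
        · simp at hlen3
        simp only [List.getD_cons_succ, List.getD_cons_zero] at hdig hne
        have hn : ¬ (pvIntOfChar d < 0) := not_lt.mpr (pvIntOfChar_digit_nonneg d hdig)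
        have hgood3 : Good rest3 := good_tail (good_tail (good_tail h))
        have := ih rest3 (acc ++ List.replicate (pvIntOfChar d).toNat e)
          (by simp at hlen ⊢; omega) hgood3
        rw [List.foldl_cons, List.foldl_cons, List.foldl_cons,
          aStep_at _ 1 (by decide), aStep_neg, aStep_pos _ _ _ hn hne]
        rw [this]
        simp [altGo, List.append_assoc]
      · have := ih rest (acc ++ [c]) (by simp at hlen; omega) (good_tail h)
        rw [List.foldl_cons, aStep_pos _ 1 _ (by decide) hc]
        simp only [Int.toNat_one, List.replicate_one]
        rw [this]
        simp [altGo, hc]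

-- ===== VERDICT (by name: the statement is the Claim_ definition above) =====
theorem restore_compressed_string_spec : Claim_equal_restore_compressed_string := by
  intro s _ hpre
  unfold Spec_restore_compressed_string restore_compressed_string restore_compressed_string_alt
  rw [key s.toList.length s.toList [] le_rfl hpre]
  simp
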